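-- pv_equiv track=rewrite | github.com/karenvega13/metabase-audit-agent | src/core/remediation/agregar_filtro_pais.py | strip_sql_strings_and_comments
-- ===== SOURCE A (Python) =====
-- def strip_sql_strings_and_comments(sql: str) -> str:
--     """Reemplaza strings/comentarios por blancos (preservando posiciones).
--     Útil para análisis estructural sin matchear keywords dentro de strings."""
--     out = list(sql)
--     i, n = 0, len(sql)
--     while i < n:
--         c = sql[i]
--         # Block comment /* ... */
--         if c == "/" and i + 1 < n and sql[i + 1] == "*":
--             j = sql.find("*/", i + 2)
--             if j == -1:
--                 j = n
--             else:
--                 j += 2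
--             for k in range(i, j):
--                 if out[k] != "\n":
--                     out[k] = " "
--             i = j
--             continue
--         # Line comment --
--         if c == "-" and i + 1 < n and sql[i + 1] == "-":
--             j = sql.find("\n", i)
--             if j == -1:
--                 j = n
--             for k in range(i, j):
--                 out[k] = " "
--             i = j
--             continue
--         # Single-quoted string
--         if c == "'":
--             j = i + 1
--             while j < n:
--                 if sql[j] == "'" and (j + 1 >= n or sql[j + 1] != "'"):
--                     j += 1
--                     break
--                 if sql[j] == "'" and j + 1 < n and sql[j + 1] == "'":
--                     j += 2
--                     continue
--                 j += 1
--             for k in range(i, j):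
--                 if out[k] != "\n":
--                     out[k] = " "
--             i = j
--             continue
--         i += 1
--     return "".join(out)
-- ===== SOURCE B (Python) =====
-- def strip_sql_strings_and_comments(sql: str) -> str:
--     """Single pass: state machine (NORMAL/BLOCK/LINE/STRING) over indices."""
--     NORMAL, BLOCK, LINE, STRING = 0, 1, 2, 3
--     n = len(sql)
--     out = []
--     state = NORMAL
--     skip_to = None  # blank this char unconditionally, then adopt this state
--     for i in range(n):
--         c = sql[i]
--         if skip_to is not None:
--             out.append(' ')
--             state = skip_to
--             skip_to = None
--         elif state == NORMAL:
--             if c == '/' and i + 1 < n and sql[i + 1] == '*':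
--                 out.append(' ')
--                 skip_to = BLOCK
--             elif c == '-' and i + 1 < n and sql[i + 1] == '-':
--                 out.append(' ')
--                 state = LINE
--             elif c == "'":
--                 out.append(' ')
--                 state = STRING
--             else:
--                 out.append(c)
--         elif state == BLOCK:
--             if c == '*' and i + 1 < n and sql[i + 1] == '/':
--                 out.append(' ')
--                 skip_to = NORMAL
--             else:
--                 out.append(c if c == '\n' else ' ')
--         elif state == LINE:
--             if c == '\n':
--                 out.append(c)
--                 state = NORMAL
--             else:
--                 out.append(' ')
--         else:  # STRING
--             if c == "'":
--                 out.append(' ')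
--                 if i + 1 < n and sql[i + 1] == "'":
--                     skip_to = STRING
--                 else:
--                     state = NORMAL
--             else:
--                 out.append(c if c == '\n' else ' ')
--     return ''.join(out)
-- ===== Notes on version B (the rewrite author's own statement) =====
-- stated objective: alternative
-- what changed: A jumps around the string with find()/an inner while loop and re-blanks ranges of a mutable list in separate passes; B is a single left-to-right pass over the characters driven by an explicit four-state machine (NORMAL/BLOCK/LINE/STRING plus a one-char skip flag) that emits each output character exactly once.
import Mathlib
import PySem

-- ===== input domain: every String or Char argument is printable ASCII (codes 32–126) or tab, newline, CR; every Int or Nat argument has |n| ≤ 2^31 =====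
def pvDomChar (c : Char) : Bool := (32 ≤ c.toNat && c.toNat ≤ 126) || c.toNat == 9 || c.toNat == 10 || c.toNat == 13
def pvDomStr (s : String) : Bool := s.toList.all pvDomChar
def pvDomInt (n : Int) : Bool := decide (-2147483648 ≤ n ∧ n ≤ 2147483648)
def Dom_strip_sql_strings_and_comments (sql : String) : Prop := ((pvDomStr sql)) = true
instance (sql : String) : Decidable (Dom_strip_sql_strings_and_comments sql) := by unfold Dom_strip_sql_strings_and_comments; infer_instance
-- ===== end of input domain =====

-- B replaces A's jump-and-scan loop (find / inner while + range re-blanking passes) by a single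
-- one-pass four-state machine (NORMAL/BLOCK/LINE/STRING) over the characters; objective: alternative decomposition.

-- ===== PORT A =====
-- for k in range(i, j): if out[k] != "\n": out[k] = " "
def pvBlankNl (out : List Char) (i j : Nat) : List Char :=
  if _h : i < j then
    pvBlankNl (if out.getD i ' ' ≠ '\n' then out.set i ' ' else out) (i + 1) j
  else out
termination_by j - i

-- for k in range(i, j): out[k] = " "
def pvBlankAll (out : List Char) (i j : Nat) : List Char :=
  if _h : i < j then pvBlankAll (out.set i ' ') (i + 1) j else out
termination_by j - i

-- the inner `while j < n` scan of the single-quoted-string branch; returns the final j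
def pvAStrScan (sql : List Char) (j n : Nat) : Nat :=
  if _h : j < n then
    if sql.getD j ' ' = '\'' ∧ (n ≤ j + 1 ∨ sql.getD (j + 1) ' ' ≠ '\'') then j + 1
    else if sql.getD j ' ' = '\'' ∧ j + 1 < n ∧ sql.getD (j + 1) ' ' = '\'' then pvAStrScan sql (j + 2) n
    else pvAStrScan sql (j + 1) n
  else j
termination_by n - j

-- the outer `while i < n` loop of A (fuel makes the recursion structural; n+1 fuel always suffices
-- since i strictly increases each iteration)
def pvALoop (sql : List Char) (out : List Char) (i n : Nat) : Nat → List Char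
  | 0 => out
  | fuel + 1 =>
    if i < n then
      if sql.getD i ' ' = '/' ∧ i + 1 < n ∧ sql.getD (i + 1) ' ' = '*' then
        let f := PySem.Chars.findFrom sql ['*', '/'] ((i : Int) + 2)
        let j := if f = -1 then n else f.toNat + 2
        pvALoop sql (pvBlankNl out i j) j n fuel
      else if sql.getD i ' ' = '-' ∧ i + 1 < n ∧ sql.getD (i + 1) ' ' = '-' then
        let f := PySem.Chars.findFrom sql ['\n'] (i : Int)
        let j := if f = -1 then n else f.toNat
        pvALoop sql (pvBlankAll out i j) j n fuel
      else if sql.getD i ' ' = '\'' then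
        let j := pvAStrScan sql (i + 1) n
        pvALoop sql (pvBlankNl out i j) j n fuel
      else pvALoop sql out (i + 1) n fuel
    else out

def strip_sql_strings_and_comments (sql : String) : String :=
  String.ofList (pvALoop sql.toList sql.toList 0 sql.toList.length (sql.toList.length + 1))

-- ===== PORT B =====
-- states: 0 = NORMAL, 1 = BLOCK, 2 = LINE, 3 = STRING; skipTo = blank this char, then adopt that state
def pvB : List Char → Nat → Option Nat → List Char
  | [], _, _ => []
  | c :: rest, state, skipTo =>
    match skipTo with
    | some st => ' ' :: pvB rest st none
    | none =>
      if state = 0 then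
        if c = '/' ∧ rest.head? = some '*' then ' ' :: pvB rest 0 (some 1)
        else if c = '-' ∧ rest.head? = some '-' then ' ' :: pvB rest 2 none
        else if c = '\'' then ' ' :: pvB rest 3 none
        else c :: pvB rest 0 none
      else if state = 1 then
        if c = '*' ∧ rest.head? = some '/' then ' ' :: pvB rest 1 (some 0)
        else (if c = '\n' then c else ' ') :: pvB rest 1 none
      else if state = 2 then
        if c = '\n' then c :: pvB rest 0 none
        else ' ' :: pvB rest 2 none
      else
        if c = '\'' then
          if rest.head? = some '\'' then ' ' :: pvB rest 3 (some 3)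
          else ' ' :: pvB rest 0 none
        else (if c = '\n' then c else ' ') :: pvB rest 3 none

def strip_sql_strings_and_comments_alt (sql : String) : String :=
  String.ofList (pvB sql.toList 0 none)

-- ===== PRECONDITION & SPEC =====
def Spec_strip_sql_strings_and_comments (sql : String) (out : String) : Prop := out = strip_sql_strings_and_comments_alt sql
instance (sql : String) (out : String) : Decidable (Spec_strip_sql_strings_and_comments sql out) := by unfold Spec_strip_sql_strings_and_comments; infer_instance

-- ===== CLAIM (what is proved, stated in full; the proofs are below) =====
def Claim_equal_strip_sql_strings_and_comments : Prop := ∀ (sql : String), Dom_strip_sql_strings_and_comments sql → Spec_strip_sql_strings_and_comments sql (strip_sql_strings_and_comments sql)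

-- ===== LEMMAS AND PROOFS =====

-- blank-keeping-newlines, as a map
def pvbl (c : Char) : Char := if c = '\n' then c else ' '

-- step/stop equations for the recursive helpers
theorem pvBlankNl_step (out : List Char) (i j : Nat) (h : i < j) :
    pvBlankNl out i j = pvBlankNl (if out.getD i ' ' ≠ '\n' then out.set i ' ' else out) (i + 1) j := by
  conv_lhs => rw [pvBlankNl]
  rw [dif_pos h]

theorem pvBlankAll_step (out : List Char) (i j : Nat) (h : i < j) :
    pvBlankAll out i j = pvBlankAll (out.set i ' ') (i + 1) j := by
  conv_lhs => rw [pvBlankAll]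
  rw [dif_pos h]

theorem pvAStrScan_stop (cs : List Char) (j n : Nat) (h : ¬ j < n) : pvAStrScan cs j n = j := by
  rw [pvAStrScan, dif_neg h]

theorem pvAStrScan_step (cs : List Char) (j n : Nat) (h : j < n) :
    pvAStrScan cs j n =
      if cs.getD j ' ' = '\'' ∧ (n ≤ j + 1 ∨ cs.getD (j + 1) ' ' ≠ '\'') then j + 1
      else if cs.getD j ' ' = '\'' ∧ j + 1 < n ∧ cs.getD (j + 1) ' ' = '\'' then pvAStrScan cs (j + 2) n
      else pvAStrScan cs (j + 1) n := by
  conv_lhs => rw [pvAStrScan]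
  rw [dif_pos h]

theorem pvALoop_stop (cs out : List Char) (i n fuel : Nat) (h : ¬ i < n) :
    pvALoop cs out i n fuel = out := by
  cases fuel with
  | zero => rfl
  | succ fuel => simp only [pvALoop, if_neg h]

-- pvB one-step equations
theorem pvB_skip (c : Char) (rest : List Char) (s st : Nat) :
    pvB (c :: rest) s (some st) = ' ' :: pvB rest st none := rfl

theorem pvB_normal_block (c : Char) (rest : List Char) (hc : c = '/') (hh : rest.head? = some '*') :
    pvB (c :: rest) 0 none = ' ' :: pvB rest 0 (some 1) := by
  subst hc; simp [pvB, hh]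

theorem pvB_normal_line (c : Char) (rest : List Char) (hc : c = '-') (hh : rest.head? = some '-') :
    pvB (c :: rest) 0 none = ' ' :: pvB rest 2 none := by
  subst hc; simp [pvB, hh]

theorem pvB_normal_quote (c : Char) (rest : List Char) (hc : c = '\'') :
    pvB (c :: rest) 0 none = ' ' :: pvB rest 3 none := by
  subst hc; simp [pvB]

theorem pvB_normal_other (c : Char) (rest : List Char)
    (h1 : ¬ (c = '/' ∧ rest.head? = some '*'))
    (h2 : ¬ (c = '-' ∧ rest.head? = some '-'))
    (h3 : ¬ (c = '\'')) :
    pvB (c :: rest) 0 none = c :: pvB rest 0 none := by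
  simp [pvB, h1, h2, h3]

theorem pvB_block_step (c : Char) (rest : List Char) (h : ¬ (c = '*' ∧ rest.head? = some '/')) :
    pvB (c :: rest) 1 none = (if c = '\n' then c else ' ') :: pvB rest 1 none := by
  simp [pvB, h]

theorem pvB_block_close (c : Char) (rest : List Char) (hc : c = '*') (hh : rest.head? = some '/') :
    pvB (c :: rest) 1 none = ' ' :: pvB rest 1 (some 0) := by
  subst hc; simp [pvB, hh]

theorem pvB_line_step (c : Char) (rest : List Char) (h : ¬ (c = '\n')) :
    pvB (c :: rest) 2 none = ' ' :: pvB rest 2 none := by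
  simp [pvB, h]

theorem pvB_line_close (rest : List Char) :
    pvB ('\n' :: rest) 2 none = '\n' :: pvB rest 0 none := by
  simp [pvB]

theorem pvB_str_step (c : Char) (rest : List Char) (h : ¬ (c = '\'')) :
    pvB (c :: rest) 3 none = (if c = '\n' then c else ' ') :: pvB rest 3 none := by
  simp [pvB, h]

theorem pvB_str_close (c : Char) (rest : List Char) (hc : c = '\'') (hh : ¬ (rest.head? = some '\'')) :
    pvB (c :: rest) 3 none = ' ' :: pvB rest 0 none := by
  subst hc; simp [pvB, hh]

theorem pvB_str_double (c : Char) (rest : List Char) (hc : c = '\'') (hh : rest.head? = some '\'') :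
    pvB (c :: rest) 3 none = ' ' :: pvB rest 3 (some 3) := by
  subst hc; simp [pvB, hh]

-- the two blanking passes, characterised positionally
theorem pvBlankNl_spec : ∀ (m : Nat) (pre suf : List Char), m ≤ suf.length →
    pvBlankNl (pre ++ suf) pre.length (pre.length + m) = pre ++ (suf.take m).map pvbl ++ suf.drop m := by
  intro m
  induction m with
  | zero =>
    intro pre suf _
    rw [pvBlankNl, dif_neg (by omega)]
    simp
  | succ m ih =>
    intro pre suf hm
    match suf with
    | c :: suf' =>
      rw [pvBlankNl_step _ _ _ (by omega)]
      have hget : (pre ++ c :: suf').getD pre.length ' ' = c := by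
        rw [List.getD_eq_getElem?_getD, List.getElem?_append_right (le_refl pre.length)]
        simp
      have hset : (pre ++ c :: suf').set pre.length ' ' = pre ++ ' ' :: suf' := by
        rw [List.set_append]
        simp
      have hone : (if (pre ++ c :: suf').getD pre.length ' ' ≠ '\n'
          then (pre ++ c :: suf').set pre.length ' ' else (pre ++ c :: suf'))
          = pre ++ pvbl c :: suf' := by
        rw [hget]
        by_cases hc : c = '\n'
        · rw [if_neg (by simp [hc]), hc]
          simp [pvbl]
        · rw [if_pos hc, hset]
          simp [pvbl, hc]
      rw [hone]
      have key := ih (pre ++ [pvbl c]) suf' (by simpa using hm)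
      have e1 : pre ++ pvbl c :: suf' = (pre ++ [pvbl c]) ++ suf' := by simp
      have e2 : pre.length + 1 = (pre ++ [pvbl c]).length := by simp
      have e3 : pre.length + (m + 1) = (pre ++ [pvbl c]).length + m := by simp; omega
      rw [e1, e2, e3, key]
      simp

theorem pvBlankAll_spec : ∀ (m : Nat) (pre suf : List Char), m ≤ suf.length →
    pvBlankAll (pre ++ suf) pre.length (pre.length + m) = pre ++ (suf.take m).map (fun _ => ' ') ++ suf.drop m := by
  intro m
  induction m with
  | zero =>
    intro pre suf _
    rw [pvBlankAll, dif_neg (by omega)]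
    simp
  | succ m ih =>
    intro pre suf hm
    match suf with
    | c :: suf' =>
      rw [pvBlankAll_step _ _ _ (by omega)]
      have hset : (pre ++ c :: suf').set pre.length ' ' = pre ++ ' ' :: suf' := by
        rw [List.set_append]
        simp
      rw [hset]
      have key := ih (pre ++ [' ']) suf' (by simpa using hm)
      have e1 : pre ++ ' ' :: suf' = (pre ++ [' ']) ++ suf' := by simp
      have e2 : pre.length + 1 = (pre ++ [' ']).length := by simp
      have e3 : pre.length + (m + 1) = (pre ++ [' ']).length + m := by simp; omega
      rw [e1, e2, e3, key]
      simp

-- B in BLOCK state, no terminator anywhere: blank everything except newlines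
theorem pvB_block_end : ∀ (cs : List Char), (∀ q, ¬ (['*', '/'] <+: cs.drop q)) →
    pvB cs 1 none = cs.map pvbl := by
  intro cs
  induction cs with
  | nil => intro _; rfl
  | cons c rest ih =>
    intro h
    have hcond : ¬ (c = '*' ∧ rest.head? = some '/') := by
      rintro ⟨rfl, hh⟩
      match rest, hh with
      | d :: rest', hh =>
        simp only [List.head?_cons, Option.some.injEq] at hh
        exact h 0 ⟨rest', by simp [hh]⟩
    rw [pvB_block_step _ _ hcond, ih (fun q => by simpa [List.drop_succ_cons] using h (q + 1))]
    simp [pvbl]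

-- B in BLOCK state, first terminator at relative position p
theorem pvB_block_found : ∀ (p : Nat) (cs : List Char), ['*', '/'] <+: cs.drop p →
    (∀ q < p, ¬ (['*', '/'] <+: cs.drop q)) →
    pvB cs 1 none = (cs.take (p + 2)).map pvbl ++ pvB (cs.drop (p + 2)) 0 none := by
  intro p
  induction p with
  | zero =>
    intro cs hp _
    obtain ⟨t, ht⟩ := hp
    simp only [List.drop_zero] at ht
    subst ht
    simp only [List.cons_append, List.nil_append]
    rw [pvB_block_close _ _ rfl (by rfl), pvB_skip]
    simp [pvbl]
  | succ p ih =>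
    intro cs hp hmin
    have hlen : p + 1 < cs.length := by
      have h1 := hp.length_le
      simp only [List.length_drop, List.length_cons, List.length_nil] at h1
      omega
    match cs with
    | c :: rest =>
      have h0 := hmin 0 (by omega)
      simp only [List.drop_zero] at h0
      have hcond : ¬ (c = '*' ∧ rest.head? = some '/') := by
        rintro ⟨rfl, hh⟩
        match rest, hh with
        | d :: rest', hh =>
          simp only [List.head?_cons, Option.some.injEq] at hh
          exact h0 ⟨rest', by simp [hh]⟩
      rw [pvB_block_step _ _ hcond,
        ih rest (by simpa [List.drop_succ_cons] using hp)
          (fun q hq => by simpa [List.drop_succ_cons] using hmin (q + 1) (by omega))]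
      have e1 : p + 1 + 2 = (p + 2) + 1 := by omega
      rw [e1, List.take_succ_cons, List.drop_succ_cons]
      simp [pvbl]

-- B in LINE state, no newline anywhere: blank everything
theorem pvB_line_end : ∀ (cs : List Char), (∀ q, ¬ (['\n'] <+: cs.drop q)) →
    pvB cs 2 none = cs.map (fun _ => ' ') := by
  intro cs
  induction cs with
  | nil => intro _; rfl
  | cons c rest ih =>
    intro h
    have hc : ¬ (c = '\n') := by
      rintro rfl
      exact h 0 ⟨rest, by simp⟩
    rw [pvB_line_step _ _ hc, ih (fun q => by simpa [List.drop_succ_cons] using h (q + 1))]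
    simp

-- B in LINE state, first newline at relative position p (the newline itself is kept)
theorem pvB_line_found : ∀ (p : Nat) (cs : List Char), ['\n'] <+: cs.drop p →
    (∀ q < p, ¬ (['\n'] <+: cs.drop q)) →
    pvB cs 2 none = (cs.take p).map (fun _ => ' ') ++ pvB (cs.drop p) 0 none := by
  intro p
  induction p with
  | zero =>
    intro cs hp _
    obtain ⟨t, ht⟩ := hp
    simp only [List.drop_zero] at ht
    subst ht
    simp only [List.cons_append, List.nil_append, List.take_zero, List.drop_zero,
      List.map_nil]
    rw [pvB_line_close,
      pvB_normal_other _ _ (by rintro ⟨h, -⟩; exact absurd h (by decide))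
        (by rintro ⟨h, -⟩; exact absurd h (by decide)) (by decide)]
  | succ p ih =>
    intro cs hp hmin
    have hlen : p + 1 < cs.length := by
      have h1 := hp.length_le
      simp only [List.length_drop, List.length_cons, List.length_nil] at h1
      omega
    match cs with
    | c :: rest =>
      have h0 := hmin 0 (by omega)
      simp only [List.drop_zero] at h0
      have hc : ¬ (c = '\n') := by
        rintro rfl
        exact h0 ⟨rest, by simp⟩
      rw [pvB_line_step _ _ hc,
        ih rest (by simpa [List.drop_succ_cons] using hp)
          (fun q hq => by simpa [List.drop_succ_cons] using hmin (q + 1) (by omega))]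
      rw [List.take_succ_cons, List.drop_succ_cons]
      simp

-- bounds of the string-scan
theorem pvAStrScan_bounds : ∀ (m : Nat) (cs : List Char) (n j : Nat), n - j ≤ m → j ≤ n →
    j ≤ pvAStrScan cs j n ∧ pvAStrScan cs j n ≤ n := by
  intro m
  induction m with
  | zero =>
    intro cs n j hm hj
    rw [pvAStrScan_stop _ _ _ (by omega)]
    omega
  | succ m ih =>
    intro cs n j hm hj
    by_cases h : j < n
    · rw [pvAStrScan_step _ _ _ h]
      split_ifs with h1 h2
      · omega
      · have := ih cs n (j + 2) (by omega) (by omega)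
        omega
      · have := ih cs n (j + 1) (by omega) (by omega)
        omega
    · rw [pvAStrScan_stop _ _ _ h]
      omega

-- B in STRING state mirrors A's inner string scan
theorem pvB_str : ∀ (m : Nat) (cs : List Char) (n j : Nat), n - j ≤ m → j ≤ n → n = cs.length →
    pvB (cs.drop j) 3 none =
      ((cs.drop j).take (pvAStrScan cs j n - j)).map pvbl ++ pvB (cs.drop (pvAStrScan cs j n)) 0 none := by
  intro m
  induction m with
  | zero =>
    intro cs n j hm hj hn
    rw [pvAStrScan_stop _ _ _ (by omega)]
    have hd : cs.drop j = [] := List.drop_eq_nil_of_le (by omega)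
    simp [hd, pvB]
  | succ m ih =>
    intro cs n j hm hj hn
    by_cases h : j < n
    · have hjl : j < cs.length := by omega
      have hdrop : cs.drop j = cs[j] :: cs.drop (j + 1) := (List.getElem_cons_drop hjl).symm
      have hgetD : cs.getD j ' ' = cs[j] := by
        rw [List.getD_eq_getElem?_getD, List.getElem?_eq_getElem hjl]
        rfl
      rw [pvAStrScan_step _ _ _ h]
      split_ifs with h1 h2
      · -- closing quote: scan stops at j + 1
        obtain ⟨hq, hnext⟩ := h1
        have hq' : cs[j] = '\'' := by rw [← hgetD]; exact hq
        have hhead : ¬ ((cs.drop (j + 1)).head? = some '\'') := by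
          rw [List.head?_drop]
          rcases hnext with hn1 | hn1
          · rw [List.getElem?_eq_none (by omega)]
            simp
          · by_cases hl : j + 1 < cs.length
            · rw [List.getElem?_eq_getElem hl]
              have hne : cs[j + 1] ≠ '\'' := by
                intro hcontra
                apply hn1
                rw [List.getD_eq_getElem?_getD, List.getElem?_eq_getElem hl, hcontra]
                rfl
              simpa using hne
            · rw [List.getElem?_eq_none (by omega)]
              simp
        rw [hdrop, pvB_str_close _ _ hq' hhead]
        have e1 : j + 1 - j = 0 + 1 := by omega
        rw [e1, List.take_succ_cons, List.take_zero]
        simp [pvbl, hq']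
      · -- doubled quote: skip both, stay in string
        obtain ⟨hq, hlt, hq2⟩ := h2
        have hq' : cs[j] = '\'' := by rw [← hgetD]; exact hq
        have hjl2 : j + 1 < cs.length := by omega
        have hq2' : cs[j + 1] = '\'' := by
          rw [List.getD_eq_getElem?_getD, List.getElem?_eq_getElem hjl2] at hq2
          exact hq2
        have hdrop2 : cs.drop (j + 1) = cs[j + 1] :: cs.drop (j + 2) := (List.getElem_cons_drop hjl2).symm
        have hhead : (cs.drop (j + 1)).head? = some '\'' := by
          rw [List.head?_drop, List.getElem?_eq_getElem hjl2, hq2']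
        have hkey := ih cs n (j + 2) (by omega) (by omega) hn
        have hb := pvAStrScan_bounds n cs n (j + 2) (by omega) (by omega)
        rw [hdrop, pvB_str_double _ _ hq' hhead, hdrop2, pvB_skip, hkey]
        have e1 : pvAStrScan cs (j + 2) n - j = (pvAStrScan cs (j + 2) n - (j + 2)) + 1 + 1 := by
          omega
        rw [e1, List.take_succ_cons, List.take_succ_cons]
        simp [pvbl, hq', hq2']
      · -- ordinary char inside the string
        have hq : ¬ (cs.getD j ' ' = '\'') := by
          intro hc
          rcases Decidable.em (n ≤ j + 1 ∨ cs.getD (j + 1) ' ' ≠ '\'') with hor | hnor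
          · exact h1 ⟨hc, hor⟩
          · push_neg at hnor
            exact h2 ⟨hc, by omega, hnor.2⟩
        have hq' : ¬ (cs[j] = '\'') := by rw [← hgetD]; exact hq
        have hkey := ih cs n (j + 1) (by omega) (by omega) hn
        have hb := pvAStrScan_bounds n cs n (j + 1) (by omega) (by omega)
        rw [hdrop, pvB_str_step _ _ hq', hkey]
        have e1 : pvAStrScan cs (j + 1) n - j = (pvAStrScan cs (j + 1) n - (j + 1)) + 1 := by omega
        rw [e1, List.take_succ_cons]
        simp [pvbl]
    · rw [pvAStrScan_stop _ _ _ h]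
      have hd : cs.drop j = [] := List.drop_eq_nil_of_le (by omega)
      simp [hd, pvB]

-- a failed findFrom means: no occurrence at any later position
theorem pvNoPrefix (cs sub : List Char) (h : ¬ (sub <:+: cs)) : ∀ q, ¬ (sub <+: cs.drop q) := by
  intro q hp
  exact h ((PySem.Chars.isIn_iff_infix _ _).mp ((PySem.Chars.exists_prefix_drop_iff_isIn _ _).mp ⟨q, hp⟩))

-- the main loop invariant: A's loop from position i (with the first i output cells finalised)
-- produces exactly the finalised prefix followed by B's machine run on the rest in NORMAL state
theorem pvMain : ∀ (m : Nat) (cs : List Char) (n i : Nat) (pre : List Char) (fuel : Nat),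
    n = cs.length → i ≤ n → pre.length = i → n - i ≤ m → n - i ≤ fuel →
    pvALoop cs (pre ++ cs.drop i) i n fuel = pre ++ pvB (cs.drop i) 0 none := by
  intro m
  induction m with
  | zero =>
    intro cs n i pre fuel hn hi hpre hm _
    rw [pvALoop_stop _ _ _ _ _ (by omega)]
    have hd : cs.drop i = [] := List.drop_eq_nil_of_le (by omega)
    simp [hd, pvB]
  | succ m ih =>
    intro cs n i pre fuel hn hi hpre hm hfuel
    by_cases h : i < n
    · obtain ⟨fuel, rfl⟩ : ∃ f, fuel = f + 1 := ⟨fuel - 1, by omega⟩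
      have hil : i < cs.length := by omega
      have hgetD : cs.getD i ' ' = cs[i] := by
        rw [List.getD_eq_getElem?_getD, List.getElem?_eq_getElem hil]
        rfl
      have hdropi : cs.drop i = cs[i] :: cs.drop (i + 1) := (List.getElem_cons_drop hil).symm
      dsimp only [pvALoop]
      rw [if_pos h]
      by_cases C1 : cs.getD i ' ' = '/' ∧ i + 1 < n ∧ cs.getD (i + 1) ' ' = '*'
      · -- block comment
        rw [if_pos C1]
        obtain ⟨hc, hlt, hstar⟩ := C1
        have hc' : cs[i] = '/' := by rw [← hgetD]; exact hc
        have hi1l : i + 1 < cs.length := by omega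
        have hstar' : cs[i + 1] = '*' := by
          rw [List.getD_eq_getElem?_getD, List.getElem?_eq_getElem hi1l] at hstar
          exact hstar
        have hdropi1 : cs.drop (i + 1) = cs[i + 1] :: cs.drop (i + 2) := (List.getElem_cons_drop hi1l).symm
        have hhead : (cs.drop (i + 1)).head? = some '*' := by
          rw [List.head?_drop, List.getElem?_eq_getElem hi1l, hstar']
        have hcast : ((i : Int) + 2) = (((i + 2 : Nat) : Int)) := by push_cast; ring
        rw [hcast]
        by_cases hf1 : PySem.Chars.findFrom cs ['*', '/'] ((i + 2 : Nat) : Int) = -1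
        · rw [if_pos hf1]
          have hnoin : ¬ (['*', '/'] <:+: cs.drop (i + 2)) :=
            (PySem.Chars.findFrom_natCast_eq_neg_one_iff cs ['*', '/'] (i + 2) (by omega)).mp hf1
          have hnopre := pvNoPrefix _ _ hnoin
          have hblank := pvBlankNl_spec (n - i) pre (cs.drop i) (by simp [List.length_drop]; omega)
          rw [hpre] at hblank
          rw [(by omega : i + (n - i) = n)] at hblank
          rw [hblank]
          have htake : (cs.drop i).take (n - i) = cs.drop i :=
            List.take_of_length_le (by simp [List.length_drop]; omega)
          have hdropn : (cs.drop i).drop (n - i) = [] :=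
            List.drop_eq_nil_of_le (by simp [List.length_drop]; omega)
          rw [htake, hdropn, pvALoop_stop _ _ _ _ _ (by omega)]
          rw [hdropi, pvB_normal_block _ _ hc' hhead, hdropi1, pvB_skip,
            pvB_block_end _ (fun q => by
              have hq := hnopre q
              simpa [List.drop_drop] using hq)]
          simp [pvbl, hc', hstar']
        · rw [if_neg hf1]
          obtain ⟨hge, hpre2, hmin⟩ :=
            PySem.Chars.findFrom_natCast_spec cs ['*', '/'] (i + 2) (by omega) hf1
          set f := PySem.Chars.findFrom cs ['*', '/'] ((i + 2 : Nat) : Int) with hfdef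
          have hge' : i + 2 ≤ f.toNat := by omega
          have hlen2 : f.toNat + 2 ≤ cs.length := by
            have hx := hpre2.length_le
            simp only [List.length_drop, List.length_cons, List.length_nil] at hx
            omega
          have hblank := pvBlankNl_spec (f.toNat + 2 - i) pre (cs.drop i)
            (by simp [List.length_drop]; omega)
          rw [hpre] at hblank
          rw [(by omega : i + (f.toNat + 2 - i) = f.toNat + 2)] at hblank
          rw [hblank]
          have e2 : (cs.drop i).drop (f.toNat + 2 - i) = cs.drop (f.toNat + 2) := by
            rw [List.drop_drop]
            congr 1
            omega
          rw [e2]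
          rw [ih cs n (f.toNat + 2) (pre ++ ((cs.drop i).take (f.toNat + 2 - i)).map pvbl) fuel hn
            (by omega) (by simp [hpre, List.length_take, List.length_drop]; omega) (by omega)
            (by omega)]
          rw [hdropi, pvB_normal_block _ _ hc' hhead, hdropi1, pvB_skip]
          have hp : ['*', '/'] <+: (cs.drop (i + 2)).drop (f.toNat - (i + 2)) := by
            rw [List.drop_drop, (by omega : i + 2 + (f.toNat - (i + 2)) = f.toNat)]
            exact hpre2
          have hmq : ∀ q < f.toNat - (i + 2), ¬ (['*', '/'] <+: (cs.drop (i + 2)).drop q) := by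
            intro q hq hcon
            rw [List.drop_drop] at hcon
            exact hmin (i + 2 + q) (by omega) (by omega) hcon
          rw [pvB_block_found _ _ hp hmq]
          have e3 : (cs.drop (i + 2)).drop (f.toNat - (i + 2) + 2) = cs.drop (f.toNat + 2) := by
            rw [List.drop_drop]
            congr 1
            omega
          rw [e3]
          have e4 : f.toNat + 2 - i = (f.toNat - (i + 2) + 2) + 1 + 1 := by omega
          rw [e4, List.take_succ_cons, List.take_succ_cons]
          simp [pvbl, hc', hstar']
      · rw [if_neg C1]
        by_cases C2 : cs.getD i ' ' = '-' ∧ i + 1 < n ∧ cs.getD (i + 1) ' ' = '-'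
        · -- line comment
          rw [if_pos C2]
          obtain ⟨hc, hlt, hdash⟩ := C2
          have hc' : cs[i] = '-' := by rw [← hgetD]; exact hc
          have hi1l : i + 1 < cs.length := by omega
          have hdash' : cs[i + 1] = '-' := by
            rw [List.getD_eq_getElem?_getD, List.getElem?_eq_getElem hi1l] at hdash
            exact hdash
          have hhead : (cs.drop (i + 1)).head? = some '-' := by
            rw [List.head?_drop, List.getElem?_eq_getElem hi1l, hdash']
          by_cases hf1 : PySem.Chars.findFrom cs ['\n'] ((i : Nat) : Int) = -1
          · rw [if_pos hf1]
            have hnoin : ¬ (['\n'] <:+: cs.drop i) :=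
              (PySem.Chars.findFrom_natCast_eq_neg_one_iff cs ['\n'] i (by omega)).mp hf1
            have hnopre := pvNoPrefix _ _ hnoin
            have hblank := pvBlankAll_spec (n - i) pre (cs.drop i) (by simp [List.length_drop]; omega)
            rw [hpre] at hblank
            rw [(by omega : i + (n - i) = n)] at hblank
            rw [hblank]
            have htake : (cs.drop i).take (n - i) = cs.drop i :=
              List.take_of_length_le (by simp [List.length_drop]; omega)
            have hdropn : (cs.drop i).drop (n - i) = [] :=
              List.drop_eq_nil_of_le (by simp [List.length_drop]; omega)
            rw [htake, hdropn, pvALoop_stop _ _ _ _ _ (by omega)]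
            rw [hdropi, pvB_normal_line _ _ hc' hhead,
              pvB_line_end _ (fun q => by
                have hq := hnopre (1 + q)
                simpa [List.drop_drop, Nat.add_assoc] using hq)]
            simp [show cs.length - i = (cs.length - (i + 1)) + 1 from by omega,
              List.replicate_succ]
          · rw [if_neg hf1]
            obtain ⟨hge, hpre2, hmin⟩ :=
              PySem.Chars.findFrom_natCast_spec cs ['\n'] i (by omega) hf1
            set f := PySem.Chars.findFrom cs ['\n'] ((i : Nat) : Int) with hfdef
            have hge' : i ≤ f.toNat := by omega
            have hjl : f.toNat < cs.length := by
              have hx := hpre2.length_le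
              simp only [List.length_drop, List.length_cons, List.length_nil] at hx
              omega
            have hnl : cs[f.toNat] = '\n' := by
              obtain ⟨t, ht⟩ := hpre2
              have h0 : (List.drop f.toNat cs).head? = some '\n' := by rw [← ht]; rfl
              rw [List.head?_drop] at h0
              obtain ⟨hx, hv⟩ := List.getElem?_eq_some_iff.mp h0
              exact hv
            have hne : i ≠ f.toNat := by
              intro hcontra
              have h1 : cs[i]? = some '-' := by rw [List.getElem?_eq_getElem hil, hc']
              rw [hcontra] at h1
              rw [List.getElem?_eq_getElem hjl, hnl] at h1
              simp at h1
            have hij : i < f.toNat := by omega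
            have hblank := pvBlankAll_spec (f.toNat - i) pre (cs.drop i)
              (by simp [List.length_drop]; omega)
            rw [hpre] at hblank
            rw [(by omega : i + (f.toNat - i) = f.toNat)] at hblank
            rw [hblank]
            have e2 : (cs.drop i).drop (f.toNat - i) = cs.drop f.toNat := by
              rw [List.drop_drop]
              congr 1
              omega
            rw [e2]
            rw [ih cs n f.toNat (pre ++ ((cs.drop i).take (f.toNat - i)).map (fun _ => ' ')) fuel hn
              (by omega) (by simp [hpre, List.length_take, List.length_drop]; omega) (by omega)
              (by omega)]
            rw [hdropi, pvB_normal_line _ _ hc' hhead]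
            have hp : ['\n'] <+: (cs.drop (i + 1)).drop (f.toNat - (i + 1)) := by
              rw [List.drop_drop, (by omega : i + 1 + (f.toNat - (i + 1)) = f.toNat)]
              exact hpre2
            have hmq : ∀ q < f.toNat - (i + 1), ¬ (['\n'] <+: (cs.drop (i + 1)).drop q) := by
              intro q hq hcon
              rw [List.drop_drop] at hcon
              exact hmin (i + 1 + q) (by omega) (by omega) hcon
            rw [pvB_line_found _ _ hp hmq]
            have e3 : (cs.drop (i + 1)).drop (f.toNat - (i + 1)) = cs.drop f.toNat := by
              rw [List.drop_drop]
              congr 1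
              omega
            rw [e3]
            have e4 : f.toNat - i = (f.toNat - (i + 1)) + 1 := by omega
            rw [e4, List.take_succ_cons]
            simp
        · rw [if_neg C2]
          by_cases C3 : cs.getD i ' ' = '\''
          · -- single-quoted string
            rw [if_pos C3]
            have hc' : cs[i] = '\'' := by rw [← hgetD]; exact C3
            have hb := pvAStrScan_bounds n cs n (i + 1) (by omega) (by omega)
            have hblank := pvBlankNl_spec (pvAStrScan cs (i + 1) n - i) pre (cs.drop i)
              (by simp [List.length_drop]; omega)
            rw [hpre] at hblank
            rw [(by omega : i + (pvAStrScan cs (i + 1) n - i) = pvAStrScan cs (i + 1) n)] at hblank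
            rw [hblank]
            have e2 : (cs.drop i).drop (pvAStrScan cs (i + 1) n - i) = cs.drop (pvAStrScan cs (i + 1) n) := by
              rw [List.drop_drop]
              congr 1
              omega
            rw [e2]
            rw [ih cs n (pvAStrScan cs (i + 1) n)
              (pre ++ ((cs.drop i).take (pvAStrScan cs (i + 1) n - i)).map pvbl) fuel hn (by omega)
              (by simp [hpre, List.length_take, List.length_drop]; omega) (by omega) (by omega)]
            rw [hdropi, pvB_normal_quote _ _ hc']
            rw [pvB_str n cs n (i + 1) (by omega) (by omega) hn]
            have e4 : pvAStrScan cs (i + 1) n - i = (pvAStrScan cs (i + 1) n - (i + 1)) + 1 := by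
              omega
            rw [e4, List.take_succ_cons]
            simp [pvbl, hc']
          · -- ordinary character
            rw [if_neg C3]
            have hc' : ¬ (cs[i] = '\'') := by rw [← hgetD]; exact C3
            have b1 : ¬ (cs[i] = '/' ∧ (cs.drop (i + 1)).head? = some '*') := by
              rintro ⟨h1, h2⟩
              rw [List.head?_drop] at h2
              obtain ⟨hlt2, hv⟩ := List.getElem?_eq_some_iff.mp h2
              apply C1
              refine ⟨by rw [hgetD]; exact h1, by omega, ?_⟩
              rw [List.getD_eq_getElem?_getD, List.getElem?_eq_getElem hlt2, hv]
              rfl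
            have b2 : ¬ (cs[i] = '-' ∧ (cs.drop (i + 1)).head? = some '-') := by
              rintro ⟨h1, h2⟩
              rw [List.head?_drop] at h2
              obtain ⟨hlt2, hv⟩ := List.getElem?_eq_some_iff.mp h2
              apply C2
              refine ⟨by rw [hgetD]; exact h1, by omega, ?_⟩
              rw [List.getD_eq_getElem?_getD, List.getElem?_eq_getElem hlt2, hv]
              rfl
            have e1 : pre ++ cs.drop i = (pre ++ [cs[i]]) ++ cs.drop (i + 1) := by
              rw [hdropi]
              simp
            rw [e1]
            rw [ih cs n (i + 1) (pre ++ [cs[i]]) fuel hn (by omega) (by simp [hpre]) (by omega)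
              (by omega)]
            rw [hdropi, pvB_normal_other _ _ b1 b2 hc']
            simp
    · rw [pvALoop_stop _ _ _ _ _ h]
      have hd : cs.drop i = [] := List.drop_eq_nil_of_le (by omega)
      simp [hd, pvB]

-- ===== VERDICT (by name: the statement is the Claim_ definition above) =====
theorem strip_sql_strings_and_comments_spec : Claim_equal_strip_sql_strings_and_comments := by
  intro sql _
  unfold Spec_strip_sql_strings_and_comments strip_sql_strings_and_comments strip_sql_strings_and_comments_alt
  have h := pvMain sql.toList.length sql.toList sql.toList.length 0 [] (sql.toList.length + 1)
    rfl (Nat.zero_le _) rfl (by omega) (by omega)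
  simpa using congrArg String.ofList h
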